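-- pv_equiv track=rewrite | github.com/microsoft/debug-gym | analysis/trajectory_filtering/criteria.py | has_consecutive_pdb_calls
-- ===== SOURCE A (Python) =====
-- def has_consecutive_pdb_calls(trajectory, n=1):
--     """
--     Did the agent call the pdb tool (any pdb command) n times in a row?
--
--     Args:
--         trajectory: List of trajectory steps (log entries)
--         n: Number of consecutive pdb calls to look for
--
--     Returns:
--         bool: True if agent called pdb n times in a row
--     """
--     if n <= 0:
--         return True
--     consecutive_pdb_count = 0
--
--     for step in trajectory:
--         action = step.get("action")
--         if action and action.get("name") == "pdb":
--             consecutive_pdb_count += 1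
--         else:
--             consecutive_pdb_count = 0
--         if consecutive_pdb_count >= n:
--             return True
--     return False
-- ===== SOURCE B (Python) =====
-- def has_consecutive_pdb_calls(trajectory, n=1):
--     """
--     Did the agent call the pdb tool (any pdb command) n times in a row?
--
--     Precompute the per-step booleans once, then look for a window of n
--     consecutive True values instead of maintaining a running counter.
--     """
--     if n <= 0:
--         return True
--
--     def is_pdb(step):
--         action = step.get("action")
--         return bool(action) and action.get("name") == "pdb"
--
--     bools = [is_pdb(step) for step in trajectory]
--     return any(all(bools[i:i + n]) for i in range(len(bools) - n + 1))
-- ===== Notes on version B (the rewrite author's own statement) =====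
-- stated objective: idiomatic
-- what changed: Replaces the running-counter loop with a precomputed per-step boolean list and an any/all scan over length-n slices (windows of n consecutive True), keeping the n <= 0 guard.
import Mathlib
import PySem

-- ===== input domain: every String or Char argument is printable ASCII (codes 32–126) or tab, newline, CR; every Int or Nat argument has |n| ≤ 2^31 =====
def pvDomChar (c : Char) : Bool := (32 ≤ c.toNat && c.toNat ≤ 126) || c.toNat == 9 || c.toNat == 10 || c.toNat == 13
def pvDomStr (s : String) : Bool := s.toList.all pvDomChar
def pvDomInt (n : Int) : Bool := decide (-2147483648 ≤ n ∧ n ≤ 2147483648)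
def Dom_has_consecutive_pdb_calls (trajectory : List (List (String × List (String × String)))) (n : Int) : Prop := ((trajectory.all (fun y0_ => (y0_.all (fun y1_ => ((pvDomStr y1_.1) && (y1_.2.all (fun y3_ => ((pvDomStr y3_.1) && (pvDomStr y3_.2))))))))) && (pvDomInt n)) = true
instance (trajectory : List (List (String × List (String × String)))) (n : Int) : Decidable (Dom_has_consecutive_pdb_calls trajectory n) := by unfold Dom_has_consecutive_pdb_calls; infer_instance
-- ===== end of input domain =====

-- B precomputes the per-step booleans once and looks for a window of n consecutive True
-- values (any/all over slices) instead of maintaining a running counter; objective: idiomatic.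

-- ===== PORT A =====
-- the for-loop with early return, carrying the running counter
def pvLoopA (n : Int) : List (List (String × List (String × String))) → Int → Bool
  | [], _ => false
  | step :: rest, cnt =>
      let action := (PySem.Dict.mk step).get? "action"
      let cnt' :=
        match action with
        | some a => if (!a.isEmpty) && ((PySem.Dict.mk a).get? "name" == some "pdb") then cnt + 1 else (0 : Int)
        | none => (0 : Int)
      if cnt' ≥ n then true else pvLoopA n rest cnt'

def has_consecutive_pdb_calls (trajectory : List (List (String × List (String × String)))) (n : Int) : Bool :=
  if n ≤ 0 then true else pvLoopA n trajectory 0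

-- ===== PORT B =====
-- is_pdb(step)
def pvIsPdb (step : List (String × List (String × String))) : Bool :=
  match (PySem.Dict.mk step).get? "action" with
  | some a => (!a.isEmpty) && ((PySem.Dict.mk a).get? "name" == some "pdb")
  | none => false

def has_consecutive_pdb_calls_alt (trajectory : List (List (String × List (String × String)))) (n : Int) : Bool :=
  if n ≤ 0 then true
  else
    let bools := trajectory.map pvIsPdb
    (PySem.List.pyRange 0 ((bools.length : Int) - n + 1) 1).any
      (fun i => (PySem.List.slice bools (some i) (some (i + n))).all id)

-- ===== PRECONDITION & SPEC =====
def Spec_has_consecutive_pdb_calls (trajectory : List (List (String × List (String × String)))) (n : Int) (out : Bool) : Prop := out = has_consecutive_pdb_calls_alt trajectory n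
instance (trajectory : List (List (String × List (String × String)))) (n : Int) (out : Bool) : Decidable (Spec_has_consecutive_pdb_calls trajectory n out) := by unfold Spec_has_consecutive_pdb_calls; infer_instance

-- ===== CLAIM (what is proved, stated in full; the proofs are below) =====
def Claim_equal_has_consecutive_pdb_calls : Prop := ∀ (trajectory : List (List (String × List (String × String)))) (n : Int), Dom_has_consecutive_pdb_calls trajectory n → Spec_has_consecutive_pdb_calls trajectory n (has_consecutive_pdb_calls trajectory n)

-- ===== LEMMAS AND PROOFS =====

-- "bs has a window of m consecutive `true`s starting at i"
def pvWin (bs : List Bool) (i m : Nat) : Prop := ∀ j < m, bs[i + j]? = some true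

theorem pvWin_len {bs : List Bool} {i m : Nat} (hm : 1 ≤ m) (h : pvWin bs i m) :
    i + m ≤ bs.length := by
  have := h (m - 1) (by omega)
  have hlt : i + (m - 1) < bs.length := by
    by_contra hge
    rw [List.getElem?_eq_none (by omega)] at this
    simp at this
  omega

-- a window of all-true cannot exist inside replicate c true when c < m
theorem pvWin_replicate {c i m : Nat} (hcm : c < m) (hm : 1 ≤ m) :
    ¬ pvWin (List.replicate c true) i m := by
  intro h
  have := pvWin_len hm h
  simp [List.length_replicate] at this
  omega

-- shifting a window across `replicate c true ++ false :: bs` (c < m)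
theorem pvWin_shift {c m : Nat} (bs : List Bool) (hcm : c < m) (_hm : 1 ≤ m) :
    (∃ i, pvWin (List.replicate c true ++ false :: bs) i m) ↔ ∃ i, pvWin bs i m := by
  constructor
  · rintro ⟨i, hi⟩
    have hic : c + 1 ≤ i := by
      by_contra hle
      have hj : c - i < m := by omega
      have := hi (c - i) hj
      have hc : (List.replicate c true ++ false :: bs)[i + (c - i)]? = some false := by
        have : i + (c - i) = c := by omega
        rw [this, List.getElem?_append_right (by simp), List.length_replicate]
        simp
      rw [hc] at this
      simp at this
    refine ⟨i - (c + 1), fun j hj => ?_⟩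
    have := hi j hj
    rw [List.getElem?_append_right (by simp; omega), List.length_replicate] at this
    have hidx : i + j - c = (i - (c + 1) + j) + 1 := by omega
    rw [hidx] at this
    simpa using this
  · rintro ⟨i, hi⟩
    refine ⟨i + c + 1, fun j hj => ?_⟩
    have := hi j hj
    rw [List.getElem?_append_right (by simp; omega), List.length_replicate]
    have hidx : i + c + 1 + j - c = (i + j) + 1 := by omega
    rw [hidx]
    simpa using this

-- A's loop, with counter c < m, finds a window of m trues in replicate c true ++ bools
theorem pvLoopA_iff (m : Nat) (hm : 1 ≤ m) (traj : List (List (String × List (String × String)))) :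
    ∀ c : Nat, c < m →
      (pvLoopA (m : Int) traj (c : Int) = true ↔
        ∃ i, pvWin (List.replicate c true ++ traj.map pvIsPdb) i m) := by
  induction traj with
  | nil =>
      intro c hc
      simp only [pvLoopA, List.map_nil, List.append_nil]
      constructor
      · intro h; exact absurd h (by simp)
      · rintro ⟨i, hi⟩; exact absurd hi (pvWin_replicate hc hm)
  | cons step rest ih =>
      intro c hc
      rw [show (step :: rest).map pvIsPdb = pvIsPdb step :: rest.map pvIsPdb from rfl]
      by_cases hp : pvIsPdb step = true
      · have hstep : pvLoopA (m : Int) (step :: rest) (c : Int) =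
            (if ((c : Int) + 1) ≥ (m : Int) then true else pvLoopA (m : Int) rest ((c : Int) + 1)) := by
          simp only [pvLoopA]
          unfold pvIsPdb at hp
          rcases hmatch : (PySem.Dict.mk step).get? "action" with _ | a <;> rw [hmatch] at hp
          · exact absurd hp (by simp)
          · simp [hp]
        have hrepl : List.replicate c true ++ true :: rest.map pvIsPdb =
            List.replicate (c + 1) true ++ rest.map pvIsPdb := by
          rw [List.replicate_succ', List.append_assoc]; rfl
        rw [hp, hstep, hrepl]
        by_cases hge : c + 1 ≥ m
        · have hcm : c + 1 = m := by omega
          rw [if_pos (by exact_mod_cast hge)]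
          constructor
          · intro _
            refine ⟨0, fun j hj => ?_⟩
            rw [List.getElem?_append_left (by simp; omega)]
            simp [hj, hcm]
          · intro _; rfl
        · rw [if_neg (by omega)]
          have := ih (c + 1) (by omega)
          rw [show ((c : Int) + 1) = ((c + 1 : Nat) : Int) by push_cast; ring] at *
          exact this
      · have hstep : pvLoopA (m : Int) (step :: rest) (c : Int) = pvLoopA (m : Int) rest 0 := by
          simp only [pvLoopA]
          unfold pvIsPdb at hp
          rcases hmatch : (PySem.Dict.mk step).get? "action" with _ | a <;> rw [hmatch] at hp
          · simp
            exact fun h0 => absurd h0 (by omega)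
          · simp [hp]
            exact fun h0 => absurd h0 (by omega)
        rw [Bool.not_eq_true] at hp
        rw [hp, hstep]
        have h0 := ih 0 (by omega)
        rw [show ((0 : Nat) : Int) = 0 from rfl] at h0
        rw [h0]
        simp only [List.replicate_zero, List.nil_append]
        exact (pvWin_shift (rest.map pvIsPdb) hc hm).symm

-- a true-window as slice-all
theorem pvSliceAll_iff {bs : List Bool} {i m : Nat} (hlen : i + m ≤ bs.length) :
    (((bs.drop i).take m).all id = true ↔ pvWin bs i m) := by
  rw [List.all_eq_true]
  constructor
  · intro h j hj
    have hjl : i + j < bs.length := by omega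
    have hmem : bs[i + j] ∈ (bs.drop i).take m := by
      have hlt : j < ((bs.drop i).take m).length := by
        simp [List.length_take, List.length_drop]; omega
      have : ((bs.drop i).take m)[j] = bs[i + j] := by
        rw [List.getElem_take, List.getElem_drop]
      rw [← this]
      exact List.getElem_mem hlt
    have := h _ hmem
    simp only [id] at this
    rw [List.getElem?_eq_getElem hjl, this]
  · intro h x hx
    obtain ⟨j, hjl, hje⟩ := List.mem_iff_getElem.mp hx
    have hjm : j < m := by
      have := hjl; simp [List.length_take, List.length_drop] at this; omega
    have : ((bs.drop i).take m)[j] = bs[i + j]'(by omega) := by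
      rw [List.getElem_take, List.getElem_drop]
    rw [this] at hje
    have hw := h j hjm
    rw [List.getElem?_eq_getElem (by omega)] at hw
    simp only [Option.some.injEq] at hw
    simp [id, ← hje, hw]

-- B's any/all over slices finds a window
theorem pvAltBody_iff (m : Nat) (hm : 1 ≤ m) (bs : List Bool) :
    ((PySem.List.pyRange 0 ((bs.length : Int) - (m : Int) + 1) 1).any
        (fun i => (PySem.List.slice bs (some i) (some (i + (m : Int)))).all id) = true ↔
      ∃ i, pvWin bs i m) := by
  rw [List.any_eq_true]
  constructor
  · rintro ⟨x, hx, hall⟩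
    rw [PySem.List.mem_pyRange_one] at hx
    obtain ⟨hx0, hxlt⟩ := hx
    have hslice : PySem.List.slice bs (some x) (some (x + (m : Int))) =
        (bs.drop x.toNat).take ((x + (m : Int)).toNat - x.toNat) := by
      exact PySem.List.slice_toNat bs hx0 (by omega)
    have htn : (x + (m : Int)).toNat - x.toNat = m := by omega
    rw [hslice, htn] at hall
    refine ⟨x.toNat, (pvSliceAll_iff (by omega)).mp hall⟩
  · rintro ⟨i, hi⟩
    have hlen := pvWin_len hm hi
    refine ⟨(i : Int), ?_, ?_⟩
    · rw [PySem.List.mem_pyRange_one]; omega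
    · have hslice : PySem.List.slice bs (some (i : Int)) (some ((i : Int) + (m : Int))) =
          (bs.drop i).take m := PySem.List.slice_natCast_add bs i m
      rw [hslice]
      exact (pvSliceAll_iff hlen).mpr hi

-- ===== VERDICT (by name: the statement is the Claim_ definition above) =====
theorem has_consecutive_pdb_calls_spec : Claim_equal_has_consecutive_pdb_calls := by
  intro traj n _
  unfold Spec_has_consecutive_pdb_calls has_consecutive_pdb_calls has_consecutive_pdb_calls_alt
  by_cases hn : n ≤ 0
  · simp [hn]
  · rw [if_neg hn, if_neg hn]
    have hm1 : 1 ≤ n.toNat := by omega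
    have hn' : n = (n.toNat : Int) := by omega
    rw [hn']
    have hA := pvLoopA_iff n.toNat hm1 traj 0 (by omega)
    rw [show ((0 : Nat) : Int) = 0 from rfl, List.replicate_zero, List.nil_append] at hA
    have hB := pvAltBody_iff n.toNat hm1 (traj.map pvIsPdb)
    simp only [List.length_map] at hB ⊢
    rcases h : pvLoopA (n.toNat : Int) traj 0 with _ | _
    · rcases hb : (PySem.List.pyRange 0 ((traj.length : Int) - (n.toNat : Int) + 1) 1).any
          (fun i => (PySem.List.slice (traj.map pvIsPdb) (some i) (some (i + (n.toNat : Int)))).all id) with _ | _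
      · rfl
      · exfalso
        have := hB.mp hb
        have := hA.mpr this
        rw [h] at this
        exact Bool.noConfusion this
    · have := hB.mpr (hA.mp h)
      exact this.symm
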